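-- pv_equiv track=rewrite | github.com/981377660LMT/algorithm-study | 20_杂题/atc競プロ/AtCoder Beginner Contest/198/E - Unique Color.py | uniqueColor
-- ===== SOURCE A (Python) =====
-- from collections import defaultdict
-- from typing import DefaultDict, List, Tuple
--
-- def uniqueColor(n: int, edges: List[Tuple[int, int]], values: List[int]) -> List[int]:
--     def dfs(cur: int, pre: int, counter: DefaultDict[int, int]) -> None:
--         counter[values[cur]] += 1
--         if counter[values[cur]] == 1:
--             res[cur] = True
--         for next in adjList[cur]:
--             if next == pre:
--                 continue
--             dfs(next, cur, counter)
--         counter[values[cur]] -= 1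
--
--     adjList = [[] for _ in range(n)]
--     for u, v in edges:
--         adjList[u].append(v)
--         adjList[v].append(u)
--
--     res = [False] * n
--     dfs(0, -1, defaultdict(int))
--     return [i for i in range(n) if res[i]]
-- ===== SOURCE B (Python) =====
-- from collections import defaultdict
-- from typing import List, Tuple
--
--
-- def uniqueColor(n: int, edges: List[Tuple[int, int]], values: List[int]) -> List[int]:
--     adjList = [[] for _ in range(n)]
--     for u, v in edges:
--         adjList[u].append(v)
--         adjList[v].append(u)
--
--     res = [False] * n
--     counter = defaultdict(int)
--     stack = [(0, -1, False)]  # (cur, pre, exiting)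
--     while stack:
--         cur, pre, exiting = stack.pop()
--         key = values[cur]
--         if exiting:
--             counter[key] -= 1
--             continue
--         counter[key] += 1
--         if counter[key] == 1:
--             res[cur] = True
--         stack.append((cur, pre, True))
--         for nxt in reversed(adjList[cur]):
--             if nxt != pre:
--                 stack.append((nxt, cur, False))
--     return [i for i in range(n) if res[i]]
-- ===== Notes on version B (the rewrite author's own statement) =====
-- stated objective: alternative
-- what changed: The recursive DFS with a shared color counter is replaced by an iterative traversal over an explicit stack of (vertex, parent, exiting) frames: an enter pop increments the counter and marks the vertex, pushes its exit frame and then its non-parent neighbors (in reversed order, so they are visited in A's order), and an exit pop decrements the counter; adjacency building and the final filter are unchanged, and B also avoids Python's recursion limit.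
import Mathlib
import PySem

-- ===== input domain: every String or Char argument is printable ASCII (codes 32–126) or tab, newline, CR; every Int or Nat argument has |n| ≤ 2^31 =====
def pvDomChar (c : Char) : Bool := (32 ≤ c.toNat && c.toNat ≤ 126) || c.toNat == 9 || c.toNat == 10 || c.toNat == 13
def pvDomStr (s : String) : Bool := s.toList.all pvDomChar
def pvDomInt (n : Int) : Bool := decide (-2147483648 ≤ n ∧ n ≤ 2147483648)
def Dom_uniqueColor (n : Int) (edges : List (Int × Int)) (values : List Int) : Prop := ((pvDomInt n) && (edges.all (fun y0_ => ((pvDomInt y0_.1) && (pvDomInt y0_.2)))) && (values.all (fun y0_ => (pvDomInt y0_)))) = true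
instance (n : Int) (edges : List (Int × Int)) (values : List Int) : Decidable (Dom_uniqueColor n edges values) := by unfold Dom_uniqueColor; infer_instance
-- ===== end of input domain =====

-- B replaces A's recursive DFS by an explicit stack machine of enter/exit frames (same counter,
-- same marking rule, same traversal order); an "alternative" of the same cost.
-- The Nat fuel in both ports is only a totality guard: `none` plays the role of Python's
-- RecursionError (it aborts the whole traversal); Pre_ inputs never exhaust the fuel.

-- ===== PORT A =====
-- Python's negative-index wraparound, exact for -len ≤ i < len (indices outside that raise in
-- Python and are outside Pre_).
def pyIx (len : Nat) (i : Int) : Nat := (if i < 0 then i + len else i).toNat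

-- Shared by both ports: both Python versions build the adjacency list with this identical loop.
def buildAdj (n : Int) (edges : List (Int × Int)) : List (List Int) :=
  edges.foldl (fun adj uv =>
    let i := pyIx adj.length uv.1
    let adj1 := adj.set i ((adj.getD i []) ++ [uv.2])
    let j := pyIx adj1.length uv.2
    adj1.set j ((adj1.getD j []) ++ [uv.1]))
    (List.replicate n.toNat [])

-- Shared postprocessing: [i for i in range(n) if res[i]] (identical line in both Pythons).
def collectRes (n : Int) (res : List Bool) : List Int :=
  (PySem.List.pyRange 0 n 1).filter (fun i => res.getD i.toNat false)

-- fuel bound used by both ports: never exhausted on Pre_ inputs (recursion depth is at most the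
-- number of distinct (cur, pre) states, which is < (2*|edges|+2)^2)
def pvFuel (n : Int) (edges : List (Int × Int)) : Nat :=
  n.toNat + (2 * edges.length + 2) * (2 * edges.length + 2) + 2

-- A's dfs: counter[values[cur]] += 1; mark cur if it became 1; recurse into non-parent neighbors;
-- counter[values[cur]] -= 1.  State = (counter, res); values[cur] via pyGet? (in range under Pre_).
mutual
def dfsA (values : List Int) (adj : List (List Int)) :
    Nat → Int → Int → PySem.Dict Int Int × List Bool → Option (PySem.Dict Int Int × List Bool)
  | 0, _, _, _ => none
  | f+1, cur, pre, st =>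
    let key := (PySem.List.pyGet? values cur).getD 0
    let cnt := st.1.getD key 0 + 1
    let counter1 := st.1.insert key cnt
    let res1 := if cnt = 1 then st.2.set (pyIx st.2.length cur) true else st.2
    match dfsALoop values adj f cur pre (adj.getD (pyIx adj.length cur) []) (counter1, res1) with
    | none => none
    | some st2 => some (st2.1.insert key (st2.1.getD key 0 - 1), st2.2)
termination_by f _ _ _ => (f, 0)

def dfsALoop (values : List Int) (adj : List (List Int)) :
    Nat → Int → Int → List Int → PySem.Dict Int Int × List Bool →
      Option (PySem.Dict Int Int × List Bool)
  | _, _, _, [], st => some st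
  | f, cur, pre, nx :: rest, st =>
    if nx = pre then dfsALoop values adj f cur pre rest st
    else
      match dfsA values adj f nx cur st with
      | none => none
      | some st' => dfsALoop values adj f cur pre rest st'
termination_by f _ _ l _ => (f, l.length + 1)
end

def uniqueColor (n : Int) (edges : List (Int × Int)) (values : List Int) : List Int :=
  let adj := buildAdj n edges
  match dfsA values adj (pvFuel n edges) 0 (-1) (PySem.Dict.empty, List.replicate n.toNat false) with
  | some st => collectRes n st.2
  | none => []

-- ===== PORT B =====
-- needed by runB's termination measure
theorem getD_length_le_sum (adj : List (List Int)) (i : Nat) :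
    (adj.getD i []).length ≤ (adj.map List.length).sum := by
  induction adj generalizing i with
  | nil => simp
  | cons l adj ih =>
    cases i with
    | zero => simp
    | succ j =>
      have := ih j
      simp only [List.getD_cons_succ, List.map_cons, List.sum_cons]
      omega

-- B's stack machine.  A frame is (fuel, cur, pre, exiting); Python B's frames are (cur, pre,
-- exiting), the per-frame fuel is only the totality guard.
def runB (values : List Int) (adj : List (List Int)) :
    List (Nat × Int × Int × Bool) → PySem.Dict Int Int × List Bool →
      Option (PySem.Dict Int Int × List Bool)
  | [], st => some st
  | (f, cur, pre, exiting) :: rest, st =>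
    if exiting then
      let key := (PySem.List.pyGet? values cur).getD 0
      runB values adj rest (st.1.insert key (st.1.getD key 0 - 1), st.2)
    else
      match f with
      | 0 => none
      | f+1 =>
        let key := (PySem.List.pyGet? values cur).getD 0
        let cnt := st.1.getD key 0 + 1
        let counter1 := st.1.insert key cnt
        let res1 := if cnt = 1 then st.2.set (pyIx st.2.length cur) true else st.2
        runB values adj
          (((adj.getD (pyIx adj.length cur) []).filter (fun nx => nx ≠ pre)).map
              (fun nx => (f, nx, cur, false))
            ++ (0, cur, pre, true) :: rest)
          (counter1, res1)
termination_by stack _ =>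
  (stack.map (fun fr => if fr.2.2.2 then 1 else ((adj.map List.length).sum + 2) ^ (fr.1 + 1))).sum
decreasing_by
  · simp
    split_ifs
    positivity
  · simp only [List.map_append, List.sum_append, List.map_cons, List.sum_cons, List.map_map]
    have hlen : ((adj.getD (pyIx adj.length cur) []).filter (fun nx => nx ≠ pre)).length
        ≤ (adj.map List.length).sum :=
      le_trans (List.length_filter_le _ _) (getD_length_le_sum adj (pyIx adj.length cur))
    have hsum : (((adj.getD (pyIx adj.length cur) []).filter (fun nx => nx ≠ pre)).map
        ((fun fr : Nat × Int × Int × Bool => if fr.2.2.2 then 1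
            else ((adj.map List.length).sum + 2) ^ (fr.1 + 1)) ∘ fun nx => (f, nx, cur, false))).sum
        = ((adj.getD (pyIx adj.length cur) []).filter (fun nx => nx ≠ pre)).length
            * ((adj.map List.length).sum + 2) ^ (f + 1) := by
      simp [Function.comp_def]
    have hx : 0 < ((adj.map List.length).sum + 2) ^ (f + 1) := by positivity
    have hpow : ((adj.map List.length).sum + 2) ^ (f + 1 + 1)
        = ((adj.map List.length).sum + 2) * ((adj.map List.length).sum + 2) ^ (f + 1) := by ring
    have hex : ¬ exiting = true := by assumption
    simp only [List.getD] at hsum hlen ⊢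
    rw [hsum]
    simp only [hex, Bool.false_eq_true, if_false, ite_true, Nat.succ_eq_add_one]
    nlinarith [hlen, hx, hpow]

def uniqueColor_alt (n : Int) (edges : List (Int × Int)) (values : List Int) : List Int :=
  let adj := buildAdj n edges
  match runB values adj [(pvFuel n edges, 0, -1, false)]
      (PySem.Dict.empty, List.replicate n.toNat false) with
  | some st => collectRes n st.2
  | none => []

-- ===== PRECONDITION & SPEC =====
-- Helpers for Pre_ (independent of the ports).  A's DFS is characterised by its (cur, pre) call
-- states: from (0, -1), each visit of cur recurses into every adjacency entry nx ≠ pre, giving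
-- state (nx, cur).  Python A returns a value exactly when every edge label is a valid index into
-- adjList (in [-n, n)), values[cur] is in range for every visited cur, and the state graph has no
-- cycle reachable from (0, -1) (otherwise the recursion never returns: RecursionError).
def preWrap (n x : Int) : Int := if x < 0 then x + n else x

-- adjacency entries seen from a vertex labelled cur (list wraparound on indices, raw entries)
def preNbrs (n : Int) (edges : List (Int × Int)) (cur : Int) : List Int :=
  edges.flatMap (fun uv =>
    (if preWrap n uv.1 = preWrap n cur then [uv.2] else []) ++
    (if preWrap n uv.2 = preWrap n cur then [uv.1] else []))

-- successor call states of call state (cur, pre)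
def preStep (n : Int) (edges : List (Int × Int)) (s : Int × Int) : List (Int × Int) :=
  ((preNbrs n edges s.1).filter (fun nx => nx ≠ s.2)).map (fun nx => (nx, s.1))

def preExpand (n : Int) (edges : List (Int × Int)) (r : List (Int × Int)) : List (Int × Int) :=
  r.foldl (fun acc s =>
    (preStep n edges s).foldl (fun acc t => if t ∈ acc then acc else acc ++ [t]) acc) r

-- saturating reachability (the iteration count is only a bound; a fixpoint stops early)
def preReach (n : Int) (edges : List (Int × Int)) : Nat → List (Int × Int) → List (Int × Int)
  | 0, r => r
  | k+1, r => let r' := preExpand n edges r; if r'.length = r.length then r else preReach n edges k r'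

-- enough iterations to saturate: more than the number of possible (cur, pre) states
def preIter (edges : List (Int × Int)) : Nat :=
  (2 * edges.length + 2) * (2 * edges.length + 2) + 2

-- Pre_uniqueColor holds exactly on the inputs where Python A returns normally: edge labels are
-- valid adjList indices, values[cur] is in range at every visited call state, and no call state
-- reachable from (0, -1) lies on a cycle (a reachable cycle means the DFS recurses forever).
def Pre_uniqueColor (n : Int) (edges : List (Int × Int)) (values : List Int) : Prop :=
  0 < n ∧
  (∀ uv ∈ edges, (-n ≤ uv.1 ∧ uv.1 < n) ∧ (-n ≤ uv.2 ∧ uv.2 < n)) ∧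
  (∀ s ∈ preReach n edges (preIter edges) [(0, -1)],
    (0 ≤ s.1 → s.1 < values.length) ∧ (s.1 < 0 → 0 ≤ s.1 + values.length)) ∧
  (∀ s ∈ preReach n edges (preIter edges) [(0, -1)],
    s ∉ preReach n edges (preIter edges) (preStep n edges s))

instance (n : Int) (edges : List (Int × Int)) (values : List Int) : Decidable (Pre_uniqueColor n edges values) := by
  unfold Pre_uniqueColor; infer_instance

def pvWitness_uniqueColor : Int × (List (Int × Int)) × List Int := (3, [(0, 1), (0, 2)], [1, 2, 1])

def Spec_uniqueColor (n : Int) (edges : List (Int × Int)) (values : List Int) (out : List Int) : Prop :=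
  out = uniqueColor_alt n edges values
instance (n : Int) (edges : List (Int × Int)) (values : List Int) (out : List Int) : Decidable (Spec_uniqueColor n edges values out) := by
  unfold Spec_uniqueColor; infer_instance

-- ===== CLAIM (what is proved, stated in full; the proofs are below) =====
def Claim_equal_uniqueColor : Prop := ∀ (n : Int) (edges : List (Int × Int)) (values : List Int), Dom_uniqueColor n edges values → Pre_uniqueColor n edges values → Spec_uniqueColor n edges values (uniqueColor n edges values)

-- ===== LEMMAS AND PROOFS =====
theorem runB_enter (values : List Int) (adj : List (List Int)) :
    ∀ (f : Nat) (cur pre : Int) (st : PySem.Dict Int Int × List Bool)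
      (rest : List (Nat × Int × Int × Bool)),
      runB values adj ((f, cur, pre, false) :: rest) st
        = (dfsA values adj f cur pre st).bind (fun st' => runB values adj rest st') := by
  intro f
  induction f with
  | zero =>
    intro cur pre st rest
    simp [runB, dfsA]
  | succ f ih =>
    intro cur pre st rest
    have inner : ∀ (l : List Int) (st : PySem.Dict Int Int × List Bool)
        (rest' : List (Nat × Int × Int × Bool)),
        runB values adj ((l.filter (fun nx => nx ≠ pre)).map (fun nx => (f, nx, cur, false)) ++ rest') st
          = (dfsALoop values adj f cur pre l st).bind (fun st' => runB values adj rest' st') := by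
      intro l
      induction l with
      | nil => intro st rest'; simp [dfsALoop]
      | cons nx l ihl =>
        intro st rest'
        by_cases h : nx = pre
        · simpa [dfsALoop, h] using ihl st rest'
        · rw [List.filter_cons_of_pos (by simp [h])]
          simp only [List.map_cons, List.cons_append]
          rw [ih nx cur st _]
          cases hd : dfsA values adj f nx cur st with
          | none => simp [dfsALoop, h, hd]
          | some st' =>
            rw [show dfsALoop values adj f cur pre (nx :: l) st
                  = dfsALoop values adj f cur pre l st' from by simp [dfsALoop, h, hd]]
            simpa using ihl st' rest'
    have exitstep : ∀ (o : Option (PySem.Dict Int Int × List Bool)),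
        o.bind (fun st' => runB values adj ((0, cur, pre, true) :: rest) st')
          = (match o with
             | none => none
             | some st2 => some (st2.1.insert ((PySem.List.pyGet? values cur).getD 0)
                 (st2.1.getD ((PySem.List.pyGet? values cur).getD 0) 0 - 1), st2.2)).bind
              (fun st' => runB values adj rest st') := by
      intro o; cases o <;> simp [runB]
    simp only [runB]
    rw [inner, exitstep]
    simp only [dfsA, Bool.false_eq_true, if_false]

theorem ports_eq (n : Int) (edges : List (Int × Int)) (values : List Int) :
    uniqueColor n edges values = uniqueColor_alt n edges values := by
  simp only [uniqueColor, uniqueColor_alt, runB_enter]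
  cases hd : dfsA values (buildAdj n edges) (pvFuel n edges) 0 (-1)
      (PySem.Dict.empty, List.replicate n.toNat false) with
  | none => simp
  | some st => simp [runB]

-- ===== VERDICT (by name: the statement is the Claim_ definition above) =====
theorem uniqueColor_spec : Claim_equal_uniqueColor := by
  intro n edges values _ _
  unfold Spec_uniqueColor
  exact ports_eq n edges values
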